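-- pv_equiv track=rewrite | github.com/CSC-510-G55/PopcornPicks | src/recommenderapp/utils.py | beautify_feedback_data
-- ===== SOURCE A (Python) =====
-- def beautify_feedback_data(data):
--     """
--     Utility function to beautify the feedback json containing predicted movies for sending in email
--     """
--     # Create empty lists for each category
--     yet_to_watch = []
--     like = []
--     dislike = []
--
--     # Iterate through the data and categorize movies
--     for movie, status in data.items():
--         if status == "Yet to watch":
--             yet_to_watch.append(movie)
--         elif status == "Like":
--             like.append(movie)
--         elif status == "Dislike":
--             dislike.append(movie)
--
--     # Create a category-dictionary of liked, disliked and yet to watch movies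
--     categorized_data_dict = {
--         "Liked": like,
--         "Disliked": dislike,
--         "Yet to Watch": yet_to_watch,
--     }
--
--     return categorized_data_dict
-- ===== SOURCE B (Python) =====
-- def beautify_feedback_data(data):
--     """Categorize movies by status via three independent filtering scans."""
--     return {
--         "Liked": [m for m, s in data.items() if s == "Like"],
--         "Disliked": [m for m, s in data.items() if s == "Dislike"],
--         "Yet to Watch": [m for m, s in data.items() if s == "Yet to watch"],
--     }
-- ===== Notes on version B (the rewrite author's own statement) =====
-- stated objective: idiomatic
-- what changed: Replaces the single loop with if/elif branches appending to three accumulator lists by three independent filtering comprehensions over the dict, one per category.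
import Mathlib
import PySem

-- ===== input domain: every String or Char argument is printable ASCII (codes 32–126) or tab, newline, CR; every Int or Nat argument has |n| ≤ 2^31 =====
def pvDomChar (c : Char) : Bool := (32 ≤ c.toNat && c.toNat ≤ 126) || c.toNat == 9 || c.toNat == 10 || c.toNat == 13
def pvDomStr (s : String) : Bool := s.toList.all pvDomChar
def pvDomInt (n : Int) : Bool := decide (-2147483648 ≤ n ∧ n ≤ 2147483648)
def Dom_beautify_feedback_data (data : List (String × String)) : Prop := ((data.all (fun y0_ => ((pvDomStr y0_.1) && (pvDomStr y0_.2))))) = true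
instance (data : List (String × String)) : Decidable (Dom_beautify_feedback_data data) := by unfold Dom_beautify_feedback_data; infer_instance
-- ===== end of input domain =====

-- B replaces A's single loop with if/elif appends by three independent per-category filters (idiomatic; same cost).

-- ===== PORT A =====
-- the loop body: one if/elif step over (yet_to_watch, like, dislike)
def bfdStep (acc : List String × List String × List String) (kv : String × String) :
    List String × List String × List String :=
  let (yet_to_watch, like, dislike) := acc
  if kv.2 == "Yet to watch" then (yet_to_watch ++ [kv.1], like, dislike)
  else if kv.2 == "Like" then (yet_to_watch, like ++ [kv.1], dislike)
  else if kv.2 == "Dislike" then (yet_to_watch, like, dislike ++ [kv.1])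
  else acc

-- one pass over data.items(), appending to three accumulator lists in branch order
def beautify_feedback_data (data : List (String × String)) : List (String × List String) :=
  let st := data.foldl bfdStep ([], [], [])
  [("Liked", st.2.1), ("Disliked", st.2.2), ("Yet to Watch", st.1)]

-- ===== PORT B =====
-- three independent filtering scans, one per category
def beautify_feedback_data_alt (data : List (String × String)) : List (String × List String) :=
  [("Liked", (data.filter (fun kv => kv.2 == "Like")).map (·.1)),
   ("Disliked", (data.filter (fun kv => kv.2 == "Dislike")).map (·.1)),
   ("Yet to Watch", (data.filter (fun kv => kv.2 == "Yet to watch")).map (·.1))]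

-- ===== PRECONDITION & SPEC =====
def Spec_beautify_feedback_data (data : List (String × String)) (out : List (String × List String)) : Prop := out = beautify_feedback_data_alt data
instance (data : List (String × String)) (out : List (String × List String)) : Decidable (Spec_beautify_feedback_data data out) := by unfold Spec_beautify_feedback_data; infer_instance

-- ===== CLAIM (what is proved, stated in full; the proofs are below) =====
def Claim_equal_beautify_feedback_data : Prop := ∀ (data : List (String × String)), Dom_beautify_feedback_data data → Spec_beautify_feedback_data data (beautify_feedback_data data)

-- ===== LEMMAS AND PROOFS =====

theorem bfd_fold (data : List (String × String)) (y l d : List String) :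
    data.foldl bfdStep (y, l, d)
    = (y ++ (data.filter (fun kv => kv.2 == "Yet to watch")).map (·.1),
       l ++ (data.filter (fun kv => kv.2 == "Like")).map (·.1),
       d ++ (data.filter (fun kv => kv.2 == "Dislike")).map (·.1)) := by
  induction data generalizing y l d with
  | nil => simp
  | cons kv tl ih =>
    simp only [List.foldl_cons, List.filter_cons]
    by_cases h1 : kv.2 == "Yet to watch"
    · simp only [bfdStep, h1, if_pos, ih]
      have h2 : ¬ (kv.2 == "Like") = true := by simp_all
      have h3 : ¬ (kv.2 == "Dislike") = true := by simp_all
      simp [h2, h3]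
    · by_cases h2 : kv.2 == "Like"
      · have h3 : ¬ (kv.2 == "Dislike") = true := by simp_all
        simp only [bfdStep, h1, h2, h3, if_pos, Bool.false_eq_true, ih]
        simp
      · by_cases h3 : kv.2 == "Dislike"
        · simp only [bfdStep, h1, h2, h3, ih]
          simp
        · simp only [bfdStep, h1, h2, h3, ih]
          simp

-- ===== VERDICT (by name: the statement is the Claim_ definition above) =====
theorem beautify_feedback_data_spec : Claim_equal_beautify_feedback_data := by
  intro data _
  unfold Spec_beautify_feedback_data beautify_feedback_data beautify_feedback_data_alt
  rw [bfd_fold]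
  simp
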